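-- pv_equiv track=rewrite | github.com/jeongwonlee1019/Statistical-Projects | inversions.py | count_permutations_with_inversion_set
-- ===== SOURCE A (Python) =====
-- from itertools import permutations
--
-- def count_permutations_with_inversion_set(n, inversion_set_1_based):
--     # Convert inversion set from 1-based to 0-based indexing
--     inversion_set = [(i - 1, j - 1) for (i, j) in inversion_set_1_based]
--
--     # Generate all permutations of length n
--     all_permutations = permutations(range(1, n + 1))
--
--     def count_inversions(perm):
--         # Count (0-based) inversion pairs in a permutation
--         inversions = []
--         for i in range(len(perm)):
--             for j in range(i + 1, len(perm)):
--                 if perm[i] > perm[j]: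
--                     inversions.append((i, j))
--         return inversions
--
--     # Check how many permutations match the desired inversion set
--     valid_perms = [
--         perm for perm in all_permutations if sorted(count_inversions(perm)) == sorted(inversion_set)
--     ]
--
--     return valid_perms
-- ===== SOURCE B (Python) =====
-- def count_permutations_with_inversion_set(n, inversion_set_1_based):
--     # An inversion-position set determines at most one permutation: instead of
--     # scanning all n! permutations, reconstruct the unique candidate from the
--     # per-position inversion counts (a Lehmer code), verify it, and return it.
--     S = [(i - 1, j - 1) for (i, j) in inversion_set_1_based]
--     m = n if n > 0 else 0
--     # pairs outside 0 <= i < j < m, or duplicates, can never be a permutation's inversion set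
--     if len(set(S)) != len(S) or any(not (0 <= i < j < m) for (i, j) in S):
--         return []
--     remaining = list(range(1, m + 1))
--     perm = []
--     for i in range(m):
--         c = sum(1 for (x, y) in S if x == i)
--         if c >= len(remaining):
--             return []
--         perm.append(remaining.pop(c))
--     inv = [(i, j) for i in range(m) for j in range(i + 1, m) if perm[i] > perm[j]]
--     return [tuple(perm)] if sorted(inv) == sorted(S) else []
-- ===== Notes on version B (the rewrite author's own statement) =====
-- stated objective: alternative
-- what changed: Instead of enumerating all n! permutations and comparing each one's inversion-pair list with the given set, B exploits that an inversion-position set determines at most one permutation: it validates the set's shape, reconstructs the unique candidate from the per-position inversion counts (Lehmer-code style), verifies it, and returns [candidate] or [].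
import Mathlib
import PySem

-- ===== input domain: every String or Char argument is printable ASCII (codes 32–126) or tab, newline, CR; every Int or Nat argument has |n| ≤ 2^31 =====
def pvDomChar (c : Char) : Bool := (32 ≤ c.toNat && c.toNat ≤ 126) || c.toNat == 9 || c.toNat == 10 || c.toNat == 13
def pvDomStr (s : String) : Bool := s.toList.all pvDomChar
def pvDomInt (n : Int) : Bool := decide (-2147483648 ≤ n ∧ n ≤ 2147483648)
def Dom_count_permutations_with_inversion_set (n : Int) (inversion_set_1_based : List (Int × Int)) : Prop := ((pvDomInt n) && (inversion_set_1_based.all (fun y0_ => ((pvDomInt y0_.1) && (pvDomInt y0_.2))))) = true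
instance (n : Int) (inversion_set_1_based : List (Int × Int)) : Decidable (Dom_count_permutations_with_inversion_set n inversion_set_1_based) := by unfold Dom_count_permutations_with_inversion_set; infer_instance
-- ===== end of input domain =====

-- B replaces A's filter over all n! permutations by a different algorithm: it reconstructs
-- the single candidate permutation from the per-position inversion counts and verifies it
-- (objective: alternative).

-- ===== PORT A =====
-- A's count_inversions(perm): the nested index loops 'for i in range(len(perm)):
-- for j in range(i+1, len(perm))'; both indices are non-negative and in range,
-- so List.range/List.range'/getD is exact here.
def pvCountInversionsA (perm : List Int) : List (Int × Int) :=
  (List.range perm.length).flatMap (fun i =>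
    (List.range' (i + 1) (perm.length - (i + 1))).filterMap (fun j =>
      if perm.getD i 0 > perm.getD j 0 then some ((i : Int), (j : Int)) else none))

def count_permutations_with_inversion_set (n : Int) (inversion_set_1_based : List (Int × Int)) : List (List Int) :=
  let inversion_set := inversion_set_1_based.map (fun p => (p.1 - 1, p.2 - 1))
  let all_permutations :=
    PySem.List.permutations (PySem.List.pyRange 1 (n + 1) 1) (PySem.List.pyRange 1 (n + 1) 1).length
  all_permutations.filter (fun perm =>
    PySem.List.sorted2 (pvCountInversionsA perm) (fun p => p.1) (fun p => p.2) ==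
      PySem.List.sorted2 inversion_set (fun p => p.1) (fun p => p.2))

-- ===== PORT B =====
-- B's inversion comprehension '[(i, j) for i in range(m) for j in range(i+1, m) if perm[i] > perm[j]]';
-- indices non-negative and in range, exact as above.
def pvInvB (m : Nat) (perm : List Int) : List (Int × Int) :=
  (List.range m).flatMap (fun i =>
    (List.range' (i + 1) (m - (i + 1))).filterMap (fun j =>
      if perm.getD i 0 > perm.getD j 0 then some ((i : Int), (j : Int)) else none))

-- B's reconstruction loop: 'for i in range(m): c = sum(1 for (x, y) in S if x == i);
-- if c >= len(remaining): return []; perm.append(remaining.pop(c))' — the early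
-- return becomes Option (none = the 'return []'); the 0/1-sum is a countP.
def pvReconLoop (S : List (Int × Int)) : List Nat → List Int → Option (List Int)
  | [], _ => some []
  | i :: rest, remaining =>
      let c := S.countP (fun p => p.1 == (i : Int))
      if h : c < remaining.length then
        match pvReconLoop S rest (remaining.eraseIdx c) with
        | some perm => some (remaining[c] :: perm)
        | none => none
      else none

-- B's tail: turn the reconstruction result into the returned list ('return []' on
-- failure, final verification 'sorted(inv) == sorted(S)' on success).
def pvFinish (S : List (Int × Int)) (mN : Nat) : Option (List Int) → List (List Int)
  | none => []
  | some perm =>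
      if PySem.List.sorted2 (pvInvB mN perm) (fun p => p.1) (fun p => p.2) ==
          PySem.List.sorted2 S (fun p => p.1) (fun p => p.2)
      then [perm] else []

def count_permutations_with_inversion_set_alt (n : Int) (inversion_set_1_based : List (Int × Int)) : List (List Int) :=
  let S := inversion_set_1_based.map (fun p => (p.1 - 1, p.2 - 1))
  let m : Int := if n > 0 then n else 0
  if (PySem.Set.ofList S).length == S.length
      && S.all (fun p => decide (0 ≤ p.1) && decide (p.1 < p.2) && decide (p.2 < m)) then
    pvFinish S m.toNat (pvReconLoop S (List.range m.toNat) (PySem.List.pyRange 1 (m + 1) 1))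
  else []

-- ===== PRECONDITION & SPEC =====
def Spec_count_permutations_with_inversion_set (n : Int) (inversion_set_1_based : List (Int × Int)) (out : List (List Int)) : Prop := out = count_permutations_with_inversion_set_alt n inversion_set_1_based
instance (n : Int) (inversion_set_1_based : List (Int × Int)) (out : List (List Int)) : Decidable (Spec_count_permutations_with_inversion_set n inversion_set_1_based out) := by unfold Spec_count_permutations_with_inversion_set; infer_instance

-- ===== CLAIM (what is proved, stated in full; the proofs are below) =====
def Claim_equal_count_permutations_with_inversion_set : Prop := ∀ (n : Int) (inversion_set_1_based : List (Int × Int)), Dom_count_permutations_with_inversion_set n inversion_set_1_based → Spec_count_permutations_with_inversion_set n inversion_set_1_based (count_permutations_with_inversion_set n inversion_set_1_based)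

-- ===== LEMMAS AND PROOFS =====

def pvInvR : List Int → List (Int × Int)
  | [] => []
  | a :: t =>
      ((List.range t.length).filterMap (fun j =>
        if t.getD j 0 < a then some ((0 : Int), ((j : Int) + 1)) else none))
      ++ (pvInvR t).map (fun p => (p.1 + 1, p.2 + 1))

lemma pvInvB_eq_invR (perm : List Int) : pvInvB perm.length perm = pvInvR perm := by
  induction perm with
  | nil => rfl
  | cons a t ih =>
    show pvInvB (t.length + 1) (a :: t) = _
    rw [pvInvB, pvInvR, List.range_succ_eq_map, List.flatMap_cons, List.flatMap_map]
    congr 1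
    · rw [show (t.length + 1 - (0 + 1)) = t.length from by omega,
        List.range'_eq_map_range, List.filterMap_map]
      apply List.filterMap_congr
      intro j hj
      simp only [Function.comp]
      rw [show (1 + j) = j + 1 from by omega, List.getD_cons_succ]
      simp only [List.getD_cons_zero]
      push_cast
      rfl
    · rw [← ih, pvInvB, List.map_flatMap]
      apply List.flatMap_congr
      intro i hi
      simp only [Nat.succ_eq_add_one]
      rw [show (t.length + 1 - (i + 1 + 1)) = t.length - (i + 1) from by omega,
        show i + 1 + 1 = 1 + (i + 1) from by omega,
        ← List.map_add_range' (a := 1) (i+1) (t.length - (i+1)) 1,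
        List.filterMap_map, List.map_filterMap]
      apply List.filterMap_congr
      intro j hj
      simp only [Function.comp]
      rw [show (1 + j) = j + 1 from by omega, List.getD_cons_succ, List.getD_cons_succ]
      split
      · simp
      · rfl

def pvCnt (S : List (Int × Int)) (i : Nat) : Nat := S.countP (fun p => p.1 == (i : Int))

lemma pvInvR_shape (p : List Int) :
    ∀ q ∈ pvInvR p, 0 ≤ q.1 ∧ q.1 < q.2 ∧ q.2 < (p.length : Int) := by
  induction p with
  | nil => intro q hq; simp [pvInvR] at hq
  | cons a t ih =>
    intro q hq
    rw [pvInvR, List.mem_append] at hq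
    rcases hq with hq | hq
    · rw [List.mem_filterMap] at hq
      obtain ⟨j, hj, hf⟩ := hq
      rw [List.mem_range] at hj
      split at hf
      · cases hf.symm
        refine ⟨le_refl 0, by omega, ?_⟩
        simp only [List.length_cons]
        push_cast
        omega
      · cases hf
    · rw [List.mem_map] at hq
      obtain ⟨q', hq', rfl⟩ := hq
      obtain ⟨h1, h2, h3⟩ := ih q' hq'
      refine ⟨by omega, by omega, ?_⟩
      simp only [List.length_cons]
      push_cast
      omega

lemma pvInvR_nodup (p : List Int) : (pvInvR p).Nodup := by
  induction p with
  | nil => simp [pvInvR]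
  | cons a t ih =>
    rw [pvInvR]
    apply List.Nodup.append
    · apply List.Nodup.filterMap _ List.nodup_range
      intro x y b hx hy
      split at hx <;> split at hy <;>
        simp only [Option.mem_def, Option.some.injEq, reduceCtorEq] at hx hy
      rw [← hx] at hy
      injection hy with e1 e2
      omega
    · exact ih.map (fun u v huv => by
        cases u; cases v; simp [Prod.ext_iff] at huv ⊢; omega)
    · intro q hq1 hq2
      rw [List.mem_filterMap] at hq1
      obtain ⟨j, hj, hf⟩ := hq1
      rw [List.mem_map] at hq2
      obtain ⟨q', hq', heq⟩ := hq2
      have := pvInvR_shape t q' hq'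
      split at hf
      · cases hf.symm
        injection heq with e1 e2
        omega
      · cases hf

lemma pvCountR (t : List Int) (q : Int → Bool) :
    (List.range t.length).countP (fun j => q (t.getD j 0)) = t.countP q := by
  induction t with
  | nil => simp
  | cons b u ih =>
    rw [List.length_cons, List.range_succ_eq_map, List.countP_cons, List.countP_map]
    have hcomp : ((fun j => q ((b :: u).getD j 0)) ∘ Nat.succ) = (fun j => q (u.getD j 0)) := by
      funext j
      simp
    rw [hcomp, ih, List.countP_cons]
    simp

lemma pvCnt_invR_zero (a : Int) (t : List Int) :
    pvCnt (pvInvR (a :: t)) 0 = t.countP (fun x => decide (x < a)) := by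
  rw [pvCnt, pvInvR, List.countP_append, List.countP_filterMap, List.countP_map]
  have h2 : ((pvInvR t).countP ((fun p => p.1 == ((0:Nat) : Int)) ∘ (fun p : Int × Int => (p.1 + 1, p.2 + 1)))) = 0 := by
    rw [List.countP_eq_zero]
    intro q hq
    have := pvInvR_shape t q hq
    simp only [Function.comp_apply, beq_iff_eq]
    simp only [Nat.cast_zero]
    omega
  rw [h2, Nat.add_zero, ← pvCountR t (fun x => decide (x < a))]
  apply List.countP_congr
  intro j hj
  by_cases h : t.getD j 0 < a
  · rw [List.getD_eq_getElem?_getD] at h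
    simp [h]
  · rw [List.getD_eq_getElem?_getD] at h
    simp [h]

lemma pvCnt_invR_succ (a : Int) (t : List Int) (i : Nat) :
    pvCnt (pvInvR (a :: t)) (i + 1) = pvCnt (pvInvR t) i := by
  rw [pvCnt, pvCnt, pvInvR, List.countP_append, List.countP_filterMap, List.countP_map]
  have h1 : (List.range t.length).countP
      (fun j => (Option.map (fun p : Int × Int => p.1 == ((i+1 : Nat) : Int))
        (if t.getD j 0 < a then some ((0 : Int), ((j : Int) + 1)) else none)).getD false) = 0 := by
    rw [List.countP_eq_zero]
    intro j hj
    split <;> simp <;> omega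
  rw [h1, Nat.zero_add]
  apply List.countP_congr
  intro q hq
  simp only [Function.comp_apply, beq_iff_eq]
  push_cast
  omega

def pvLexLe (a b : Int × Int) : Prop := a.1 < b.1 ∨ (a.1 = b.1 ∧ a.2 ≤ b.2)

def pvBefore (a b : Int × Int) : Bool :=
  decide (a.1 < b.1) || (!decide (b.1 < a.1) && decide (a.2 < b.2))

lemma pvBefore_true {a b : Int × Int} (h : pvBefore a b = true) : pvLexLe a b := by
  unfold pvBefore at h
  unfold pvLexLe
  simp at h
  omega

lemma pvBefore_false {a b : Int × Int} (h : pvBefore a b = false) : pvLexLe b a := by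
  unfold pvBefore at h
  unfold pvLexLe
  simp at h
  omega

lemma pvLexLe_trans {a b c : Int × Int} (h1 : pvLexLe a b) (h2 : pvLexLe b c) : pvLexLe a c := by
  unfold pvLexLe at *
  omega

lemma pvInsertBy_nil (x : Int × Int) : PySem.List.insertBy pvBefore x [] = [x] := rfl

lemma pvInsertBy_cons (x y : Int × Int) (ys : List (Int × Int)) :
    PySem.List.insertBy pvBefore x (y :: ys) =
      if pvBefore x y then x :: y :: ys else y :: PySem.List.insertBy pvBefore x ys := rfl

lemma pvInsertBy_pairwise (x : Int × Int) (ys : List (Int × Int))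
    (h : ys.Pairwise pvLexLe) :
    (PySem.List.insertBy pvBefore x ys).Pairwise pvLexLe := by
  induction ys with
  | nil => simp [pvInsertBy_nil]
  | cons y ys ih =>
    rw [pvInsertBy_cons]
    rw [List.pairwise_cons] at h
    obtain ⟨hy, hys⟩ := h
    split
    · rename_i hb
      refine List.pairwise_cons.2 ⟨?_, List.pairwise_cons.2 ⟨hy, hys⟩⟩
      intro z hz
      rcases List.mem_cons.1 hz with rfl | hz
      · exact pvBefore_true hb
      · exact pvLexLe_trans (pvBefore_true hb) (hy z hz)
    · rename_i hb
      refine List.pairwise_cons.2 ⟨?_, ih hys⟩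
      intro z hz
      rcases (PySem.List.mem_insertBy pvBefore x z ys).1 hz with rfl | hz
      · exact pvBefore_false (by simpa using hb)
      · exact hy z hz

lemma pvSorted2_foldl (xs : List (Int × Int)) :
    PySem.List.sorted2 xs (fun p => p.1) (fun p => p.2) =
      xs.foldl (fun acc x => PySem.List.insertBy pvBefore x acc) [] := rfl

lemma pvSorted2_pairwise (xs : List (Int × Int)) :
    (PySem.List.sorted2 xs (fun p => p.1) (fun p => p.2)).Pairwise pvLexLe := by
  rw [pvSorted2_foldl]
  suffices h : ∀ acc : List (Int × Int), acc.Pairwise pvLexLe →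
      (xs.foldl (fun acc x => PySem.List.insertBy pvBefore x acc) acc).Pairwise pvLexLe from
    h [] (by simp)
  induction xs with
  | nil => intro acc hacc; exact hacc
  | cons x xs ih =>
    intro acc hacc
    exact ih _ (pvInsertBy_pairwise x acc hacc)

lemma pvSorted2_eq_iff_perm (X Y : List (Int × Int)) :
    PySem.List.sorted2 X (fun p => p.1) (fun p => p.2) =
      PySem.List.sorted2 Y (fun p => p.1) (fun p => p.2) ↔ X.Perm Y := by
  constructor
  · intro h
    exact (PySem.List.sorted2_perm X _ _ false).symm.trans
      (h ▸ PySem.List.sorted2_perm Y _ _ false)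
  · intro h
    apply List.eq_of_perm_of_sorted (le := pvLexLe)
    · intro a b _ _ h1 h2
      unfold pvLexLe at h1 h2
      cases a; cases b
      simp only [Prod.mk.injEq]
      constructor <;> omega
    · exact pvSorted2_pairwise X
    · exact pvSorted2_pairwise Y
    · exact (PySem.List.sorted2_perm X _ _ false).trans
        (h.trans (PySem.List.sorted2_perm Y _ _ false).symm)

lemma pvSortedPick : ∀ (r : List Int) (a : Int) (c : Nat),
    r.Pairwise (· < ·) → a ∈ r → r.countP (fun x => decide (x < a)) = c →
    r[c]? = some a ∧ r.eraseIdx c = r.erase a := by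
  intro r
  induction r with
  | nil => intro a c _ ha; cases ha
  | cons b rb ih =>
    intro a c hp ha hc
    rw [List.pairwise_cons] at hp
    obtain ⟨hb, hrb⟩ := hp
    rcases List.mem_cons.1 ha with rfl | ha
    · have h0 : rb.countP (fun x => decide (x < a)) = 0 := by
        rw [List.countP_eq_zero]
        intro z hz
        have := hb z hz
        simp
        omega
      rw [List.countP_cons] at hc
      simp at hc
      have : c = 0 := by omega
      subst this
      refine ⟨rfl, ?_⟩
      rw [List.eraseIdx_zero, List.erase_cons_head, List.tail_cons]
    · have hba : b < a := hb a ha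
      rw [List.countP_cons] at hc
      rw [if_pos (by simpa using hba)] at hc
      obtain ⟨c', rfl⟩ : ∃ c', c = c' + 1 := ⟨rb.countP (fun x => decide (x < a)), by omega⟩
      have hrec := ih a c' hrb ha (by omega)
      refine ⟨by simpa using hrec.1, ?_⟩
      rw [List.eraseIdx_cons_succ, hrec.2]
      rw [List.erase_cons_tail (by simp; omega)]

lemma pvReconLoop_perm (S : List (Int × Int)) :
    ∀ (idx : List Nat) (r perm : List Int), idx.length = r.length →
      pvReconLoop S idx r = some perm → perm.Perm r := by
  intro idx
  induction idx with
  | nil =>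
    intro r perm hlen h
    rw [pvReconLoop] at h
    cases h
    have : r = [] := List.length_eq_zero_iff.1 hlen.symm
    subst this
    exact List.Perm.refl _
  | cons i rest ih =>
    intro r perm hlen h
    rw [pvReconLoop] at h
    set c := S.countP (fun p => p.1 == (i : Int)) with hc
    by_cases hlt : c < r.length
    · rw [dif_pos hlt] at h
      cases hrec : pvReconLoop S rest (r.eraseIdx c) with
      | none => rw [hrec] at h; cases h
      | some perm' =>
        rw [hrec] at h
        cases h
        have hlen' : rest.length = (r.eraseIdx c).length := by
          rw [List.length_eraseIdx_of_lt hlt]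
          simp at hlen
          omega
        have := ih (r.eraseIdx c) perm' hlen' hrec
        exact (this.cons r[c]).trans (List.getElem_cons_eraseIdx_perm hlt)
    · rw [dif_neg hlt] at h
      cases h

lemma pvRecon_main (S : List (Int × Int)) :
    ∀ (t : List Int) (off : Nat) (r : List Int),
      (∀ i : Nat, pvCnt S (off + i) = pvCnt (pvInvR t) i) →
      r.Perm t → r.Pairwise (· < ·) →
      pvReconLoop S (List.range' off t.length) r = some t := by
  intro t
  induction t with
  | nil =>
    intro off r _ hr _
    have : r = [] := hr.eq_nil  -- r ~ [] → r = []
    subst this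
    rfl
  | cons a u ih =>
    intro off r hcnt hr hp
    have h0 : pvCnt S off = u.countP (fun x => decide (x < a)) := by
      have := hcnt 0
      rw [Nat.add_zero] at this
      rw [this, pvCnt_invR_zero]
    have hc : r.countP (fun x => decide (x < a)) = pvCnt S off := by
      rw [hr.countP_eq, List.countP_cons, h0]
      simp
    have ha : a ∈ r := hr.mem_iff.2 (List.mem_cons_self)
    have hpick := pvSortedPick r a (pvCnt S off) hp ha hc
    have hlt : pvCnt S off < r.length := by
      have := hpick.1
      rw [List.getElem?_eq_some_iff] at this
      exact this.1
    have hget : r[pvCnt S off]'hlt = a := by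
      have := hpick.1
      rw [List.getElem?_eq_some_iff] at this
      exact this.2
    rw [List.length_cons, List.range'_succ, pvReconLoop]
    have hcEq : S.countP (fun p => p.1 == (off : Int)) = pvCnt S off := rfl
    rw [hcEq, dif_pos hlt]
    have herase : r.eraseIdx (pvCnt S off) = r.erase a := hpick.2
    have hrec : pvReconLoop S (List.range' (off + 1) u.length) (r.eraseIdx (pvCnt S off)) = some u := by
      apply ih (off + 1)
      · intro i
        have := hcnt (i + 1)
        rw [show off + 1 + i = off + (i + 1) from by omega, this, pvCnt_invR_succ]
      · rw [herase]
        have : (r.erase a).Perm ((a :: u).erase a) := hr.erase a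
        rwa [List.erase_cons_head] at this
      · exact hp.sublist (List.eraseIdx_sublist r (pvCnt S off))
    rw [hrec, hget]

lemma pvPermutations_succ (xs : List Int) (r : Nat) :
    PySem.List.permutations xs (r+1) =
      (List.range xs.length).flatMap (fun i =>
        match xs[i]? with
        | none => []
        | some a => (PySem.List.permutations (xs.eraseIdx i) r).map (a :: ·)) := by
  rw [PySem.List.permutations.eq_def]
  split
  · omega
  · rename_i xs2 xs1 k r' heq
    obtain rfl : r' = r := by omega
    apply List.flatMap_congr
    intro i hi
    cases xs2[i]? <;> rfl

lemma pvPermutations_succ' (xs : List Int) (r : Nat) :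
    PySem.List.permutations xs (r+1) =
      (List.range xs.length).flatMap (fun i =>
        (PySem.List.permutations (xs.eraseIdx i) r).map (xs.getD i 0 :: ·)) := by
  rw [pvPermutations_succ]
  apply List.flatMap_congr
  intro i hi
  have hilt := List.mem_range.1 hi
  rw [List.getElem?_eq_getElem hilt]
  have hgd : xs.getD i 0 = xs[i] := by
    rw [List.getD_eq_getElem?_getD, List.getElem?_eq_getElem hilt]
    rfl
  rw [hgd]

lemma pvSum_indicator (l : List Nat) (i0 : Nat) :
    (l.map (fun i => if i = i0 then (1 : Nat) else 0)).sum = l.count i0 := by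
  induction l with
  | nil => rfl
  | cons x l ih =>
    rw [List.map_cons, List.sum_cons, ih, List.count_cons]
    by_cases hx : x = i0
    · simp [hx, Nat.add_comm]
    · simp [hx]

lemma pvPermutations_count : ∀ (n : Nat) (xs : List Int), xs.length = n → xs.Nodup →
    ∀ p : List Int, (PySem.List.permutations xs n).count p = if p.Perm xs then 1 else 0 := by
  intro n
  induction n with
  | zero =>
    intro xs hlen hnd p
    have hx : xs = [] := List.length_eq_zero_iff.1 hlen
    subst hx
    rw [PySem.List.permutations_zero]
    rcases p with _ | ⟨a, t⟩
    · simp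
    · rw [if_neg (by simp [List.perm_nil])]
      simp
  | succ k ih =>
    intro xs hlen hnd p
    rw [show PySem.List.permutations xs (k+1) =
        (List.range xs.length).flatMap (fun i =>
          (PySem.List.permutations (xs.eraseIdx i) k).map (xs.getD i 0 :: ·)) from
      pvPermutations_succ' xs k]
    rw [List.count_flatMap]
    by_cases hp : p.Perm xs
    · rcases p with _ | ⟨a, t⟩
      · exfalso
        have := hp.length_eq
        simp at this
        omega
      · have hat : a ∈ xs := hp.mem_iff.1 List.mem_cons_self
        have hi0lt : xs.idxOf a < xs.length := List.idxOf_lt_length_of_mem hat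
        have hgi0 : xs[xs.idxOf a] = a := List.getElem_idxOf hi0lt
        have hmc : List.map (List.count (a :: t) ∘ fun i =>
            (PySem.List.permutations (xs.eraseIdx i) k).map (xs.getD i 0 :: ·))
            (List.range xs.length) =
            List.map (fun i => if i = xs.idxOf a then (1 : Nat) else 0) (List.range xs.length) := by
          apply List.map_congr_left
          intro i hi
          have hilt := List.mem_range.1 hi
          have hgd : xs.getD i 0 = xs[i] := by
            rw [List.getD_eq_getElem?_getD, List.getElem?_eq_getElem hilt]
            rfl
          simp only [Function.comp_apply, hgd]
          by_cases hie : i = xs.idxOf a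
          · subst hie
            rw [if_pos rfl, hgi0, List.count_map_of_injective _ _ List.cons_injective]
            have hlen' : (xs.eraseIdx (xs.idxOf a)).length = k := by
              have := List.length_eraseIdx_add_one hilt
              omega
            have hnd' : (xs.eraseIdx (xs.idxOf a)).Nodup :=
              (List.eraseIdx_sublist xs (xs.idxOf a)).nodup hnd
            have hperm' : t.Perm (xs.eraseIdx (xs.idxOf a)) := by
              have := (List.cons_perm_iff_perm_erase.1 hp).2
              rwa [← List.eraseIdx_idxOf_eq_erase] at this
            rw [ih _ hlen' hnd' t, if_pos hperm']
          · rw [if_neg hie, List.count_eq_zero]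
            intro hmem
            rw [List.mem_map] at hmem
            obtain ⟨q, hq, heq⟩ := hmem
            injection heq with h1 h2
            rw [← hgi0] at h1
            exact hie (hnd.getElem_inj_iff.1 h1)
        rw [hmc, pvSum_indicator, if_pos hp]
        exact List.count_eq_one_of_mem List.nodup_range (List.mem_range.2 hi0lt)
    · rw [if_neg hp]
      have hmc : List.map (List.count p ∘ fun i =>
          (PySem.List.permutations (xs.eraseIdx i) k).map (xs.getD i 0 :: ·))
          (List.range xs.length) =
          List.map (fun _ => (0 : Nat)) (List.range xs.length) := by
        apply List.map_congr_left
        intro i hi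
        have hilt := List.mem_range.1 hi
        simp only [Function.comp_apply]
        rw [List.count_eq_zero]
        intro hmem
        rw [List.mem_map] at hmem
        obtain ⟨q, hq, heq⟩ := hmem
        obtain ⟨hqlen, rest, hqperm⟩ := PySem.List.exists_perm_of_mem_permutations k _ q hq
        have hrest : rest = [] := by
          have h1 := hqperm.length_eq
          rw [List.length_append, hqlen] at h1
          have h2 := List.length_eraseIdx_add_one hilt
          have : rest.length = 0 := by omega
          exact List.length_eq_zero_iff.1 this
        subst hrest
        rw [List.append_nil] at hqperm
        have hgd : xs.getD i 0 = xs[i] := by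
          rw [List.getD_eq_getElem?_getD, List.getElem?_eq_getElem hilt]
          rfl
        rw [hgd] at heq
        have : p.Perm xs := by
          rw [← heq]
          exact (hqperm.cons xs[i]).trans (List.getElem_cons_eraseIdx_perm hilt)
        exact hp this
      rw [hmc]
      simp

lemma pvFilter_unique {α : Type} [BEq α] [LawfulBEq α] (pred : α → Bool) (e : α) :
    ∀ l : List α, (∀ x ∈ l, pred x = true → x = e) →
    l.filter pred = if pred e then List.replicate (l.count e) e else [] := by
  intro l
  induction l with
  | nil => intro _; simp
  | cons x l ih =>
    intro h
    have ihl := ih (fun y hy => h y (List.mem_cons_of_mem x hy))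
    by_cases hpx : pred x = true
    · have hxe : x = e := h x List.mem_cons_self hpx
      subst hxe
      rw [List.filter_cons_of_pos hpx, List.count_cons_self, ihl, if_pos hpx, if_pos hpx]
      rfl
    · rw [List.filter_cons_of_neg (by simpa using hpx), ihl]
      by_cases hxe : x = e
      · subst hxe
        rw [if_neg hpx, if_neg hpx]
      · rw [List.count_cons_of_ne (fun hh => hxe hh)]

lemma pvCountInversionsA_eq_invR (perm : List Int) :
    pvCountInversionsA perm = pvInvR perm := pvInvB_eq_invR perm

lemma pvPredA_iff (S : List (Int × Int)) (perm : List Int) :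
    ((PySem.List.sorted2 (pvCountInversionsA perm) (fun p => p.1) (fun p => p.2) ==
      PySem.List.sorted2 S (fun p => p.1) (fun p => p.2)) = true) ↔ (pvInvR perm).Perm S := by
  rw [beq_iff_eq, pvCountInversionsA_eq_invR, pvSorted2_eq_iff_perm]

lemma pvPredB_iff (S : List (Int × Int)) (mN : Nat) (cand : List Int) (hlen : mN = cand.length) :
    ((PySem.List.sorted2 (pvInvB mN cand) (fun p => p.1) (fun p => p.2) ==
      PySem.List.sorted2 S (fun p => p.1) (fun p => p.2)) = true) ↔ (pvInvR cand).Perm S := by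
  subst hlen
  rw [beq_iff_eq, pvInvB_eq_invR, pvSorted2_eq_iff_perm]

lemma pvKey1 (S : List (Int × Int)) (xs perm : List Int) (hpw : xs.Pairwise (· < ·))
    (hperm : perm.Perm xs) (hmatch : (pvInvR perm).Perm S) :
    pvReconLoop S (List.range xs.length) xs = some perm := by
  have hcnt : ∀ i : Nat, pvCnt S (0 + i) = pvCnt (pvInvR perm) i := by
    intro i
    rw [Nat.zero_add, pvCnt, pvCnt, (hmatch.countP_eq _).symm]
  have h := pvRecon_main S perm 0 xs hcnt hperm.symm hpw
  rw [List.range_eq_range', ← hperm.length_eq]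
  exact h

lemma pvMain : ∀ (n : Int) (S1 : List (Int × Int)),
    count_permutations_with_inversion_set n S1 = count_permutations_with_inversion_set_alt n S1 := by
  intro n S1
  unfold count_permutations_with_inversion_set count_permutations_with_inversion_set_alt
  simp only []
  set S : List (Int × Int) := S1.map (fun p => (p.1 - 1, p.2 - 1)) with hS
  set m : Int := if n > 0 then n else 0 with hm
  have hm0 : 0 ≤ m := by rw [hm]; split <;> omega
  set xs : List Int := PySem.List.pyRange 1 (n + 1) 1 with hxs
  have hxs_eq : PySem.List.pyRange 1 (m + 1) 1 = xs := by
    rw [hxs, hm]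
    split
    · rfl
    · rw [PySem.List.pyRange_one_eq_nil (by omega), PySem.List.pyRange_one_eq_nil (by omega)]
  have hxlen : xs.length = m.toNat := by
    rw [← hxs_eq, PySem.List.length_pyRange_one]
    omega
  have hxnodup : xs.Nodup := by rw [hxs]; exact PySem.List.nodup_pyRange_one 1 (n+1)
  have hxpw : xs.Pairwise (· < ·) := by rw [hxs]; exact PySem.List.pairwise_lt_pyRange_one 1 (n+1)
  rw [hxs_eq, ← hxlen]
  by_cases htest : ((PySem.Set.ofList S).length == S.length
      && S.all (fun p => decide (0 ≤ p.1) && decide (p.1 < p.2) && decide (p.2 < m))) = true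
  · rw [if_pos htest]
    cases hrec : pvReconLoop S (List.range xs.length) xs with
    | none =>
      simp only [pvFinish]
      rw [List.filter_eq_nil_iff.2 ?_]
      intro x hx hpx
      have hxp : x.Perm xs := PySem.List.perm_of_mem_permutations hx
      have hmm := (pvPredA_iff S x).1 hpx
      have h := pvKey1 S xs x hxpw hxp hmm
      rw [hrec] at h
      cases h
    | some cand =>
      simp only [pvFinish]
      have hcand : cand.Perm xs :=
        pvReconLoop_perm S (List.range xs.length) xs cand (by simp) hrec
      have hclen : xs.length = cand.length := hcand.length_eq.symm
      have huniq : ∀ x ∈ PySem.List.permutations xs xs.length,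
          (fun perm => (PySem.List.sorted2 (pvCountInversionsA perm) (fun p => p.1) (fun p => p.2) ==
            PySem.List.sorted2 S (fun p => p.1) (fun p => p.2))) x = true → x = cand := by
        intro x hx hpx
        have hxp : x.Perm xs := PySem.List.perm_of_mem_permutations hx
        have hmm := (pvPredA_iff S x).1 hpx
        have h := pvKey1 S xs x hxpw hxp hmm
        rw [hrec] at h
        cases h
        rfl
      rw [pvFilter_unique _ cand _ huniq]
      have hcount : (PySem.List.permutations xs xs.length).count cand = 1 := by
        rw [pvPermutations_count xs.length xs rfl hxnodup cand, if_pos hcand]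
      rw [hcount]
      by_cases hmc : (pvInvR cand).Perm S
      · rw [if_pos ((pvPredA_iff S cand).2 hmc), if_pos ((pvPredB_iff S xs.length cand hclen).2 hmc)]
        rfl
      · rw [if_neg (fun hh => hmc ((pvPredA_iff S cand).1 hh)),
          if_neg (fun hh => hmc ((pvPredB_iff S xs.length cand hclen).1 hh))]
  · rw [if_neg htest]
    rw [List.filter_eq_nil_iff.2 ?_]
    intro x hx hpx
    have hxp : x.Perm xs := PySem.List.perm_of_mem_permutations hx
    have hmm := (pvPredA_iff S x).1 hpx
    apply htest
    have hndS : S.Nodup := hmm.nodup (pvInvR_nodup x)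
    have hshape : ∀ q ∈ S, 0 ≤ q.1 ∧ q.1 < q.2 ∧ q.2 < m := by
      intro q hq
      have hb := pvInvR_shape x q (hmm.symm.subset hq)
      have hxl : ((x.length : Nat) : Int) = m := by
        rw [hxp.length_eq, hxlen, Int.toNat_of_nonneg hm0]
      exact ⟨hb.1, hb.2.1, by rw [← hxl]; exact hb.2.2⟩
    rw [PySem.Set.ofList_eq_self_of_nodup S hndS, beq_self_eq_true, Bool.true_and,
      List.all_eq_true]
    intro q hq
    obtain ⟨h1, h2, h3⟩ := hshape q hq
    simp only [Bool.and_eq_true, decide_eq_true_eq]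
    exact ⟨⟨h1, h2⟩, h3⟩

-- ===== VERDICT (by name: the statement is the Claim_ definition above) =====
theorem count_permutations_with_inversion_set_spec : Claim_equal_count_permutations_with_inversion_set := by
  intro n inversion_set_1_based _
  exact pvMain n inversion_set_1_based
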